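-- pv_equiv track=rewrite | github.com/TheSixthBrigade/radiant-realm-project | whitelisting service/new_obfuscator/transforms/formatter.py | _remove_singleline_comments
-- ===== SOURCE A (Python) =====
-- def _remove_singleline_comments(code: str) -> str:
--     """
--     Remove single-line comments -- ...
--
--     Preserves -- inside strings.
--
--     Args:
--         code: Lua source code
--
--     Returns:
--         Code with single-line comments removed
--     """
--     # Simple approach: remove -- to end of line (not in strings)
--     # This is called after strings are extracted, so it's safe
--     lines = code.split('\n')
--     result = []
--
--     for line in lines:
--         # Find -- that's not part of a longer pattern
--         comment_pos = -1
--         i = 0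
--         while i < len(line) - 1:
--             if line[i:i+2] == '--':
--                 # Check it's not --[[ (multi-line start)
--                 if i + 2 < len(line) and line[i+2] == '[':
--                     i += 1
--                     continue
--                 comment_pos = i
--                 break
--             i += 1
--
--         if comment_pos != -1:
--             result.append(line[:comment_pos])
--         else:
--             result.append(line)
--
--     return '\n'.join(result)
-- ===== SOURCE B (Python) =====
-- def _remove_singleline_comments(code: str) -> str:
--     # Single left-to-right pass over the whole string; no line splitting.
--     out = []
--     i, n = 0, len(code)
--     while i < n:
--         if code[i] == '-' and i + 1 < n and code[i + 1] == '-':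
--             if i + 2 < n and code[i + 2] == '[':
--                 # '--[' may start a multi-line comment: keep scanning one char on
--                 out.append('-')
--                 i += 1
--             else:
--                 # comment: drop everything up to (not including) the newline
--                 i += 2
--                 while i < n and code[i] != '\n':
--                     i += 1
--         else:
--             out.append(code[i])
--             i += 1
--     return ''.join(out)
-- ===== Notes on version B (the rewrite author's own statement) =====
-- stated objective: alternative
-- what changed: B replaces A's split-into-lines / per-line index scan with comment_pos / truncate / join pipeline by a single left-to-right pass over the whole string that emits characters and, on seeing '--' not followed by '[', skips ahead to the next newline.
import Mathlib
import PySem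

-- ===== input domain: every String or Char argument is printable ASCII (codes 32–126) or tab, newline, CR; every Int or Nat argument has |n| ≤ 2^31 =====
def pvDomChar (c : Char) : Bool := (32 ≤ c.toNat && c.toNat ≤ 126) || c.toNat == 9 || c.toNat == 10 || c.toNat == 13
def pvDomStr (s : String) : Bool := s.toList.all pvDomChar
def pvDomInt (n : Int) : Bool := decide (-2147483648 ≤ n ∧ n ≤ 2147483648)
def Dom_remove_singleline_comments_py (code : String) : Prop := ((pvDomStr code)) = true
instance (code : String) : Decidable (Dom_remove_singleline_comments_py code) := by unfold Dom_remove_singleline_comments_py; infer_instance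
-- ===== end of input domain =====

-- B replaces A's split-into-lines / per-line index scan / join with one left-to-right pass
-- over the whole string (objective: alternative; same value on every input).

-- ===== PORT A =====
-- the inner 'while i < len(line) - 1' loop of A: returns comment_pos (-1 if none found)
def pvFindC (line : List Char) (i : Nat) : Int :=
  if h : (i : Int) < (line.length : Int) - 1 then
    if PySem.List.slice line (some (i : Int)) (some ((i : Int) + 2)) = ['-', '-'] then
      if (i : Int) + 2 < (line.length : Int) ∧ PySem.List.pyGet? line ((i : Int) + 2) = some '[' then
        pvFindC line (i + 1)
      else (i : Int)
    else pvFindC line (i + 1)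
  else -1
termination_by line.length - i
decreasing_by all_goals omega

-- body of A's 'for line in lines' loop
def pvLineA (line : List Char) : List Char :=
  let cp := pvFindC line 0
  if cp ≠ -1 then PySem.List.slice line none (some cp) else line

def remove_singleline_comments_py (code : String) : String :=
  String.ofList (PySem.Chars.join ['\n'] ((PySem.Chars.splitOn code.toList ['\n']).map pvLineA))

-- ===== PORT B =====
-- B's single pass: emit chars; on '--' not followed by '[' drop up to the next newline
def pvScanB : List Char → List Char
  | [] => []
  | c :: cs =>
    if c = '-' ∧ cs.head? = some '-' then
      if cs.tail.head? = some '[' then c :: pvScanB cs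
      else pvScanB (cs.tail.dropWhile (· != '\n'))
    else c :: pvScanB cs
termination_by l => l.length
decreasing_by
  all_goals
    first
      | (simp; omega)
      | (have h1 := List.length_dropWhile_le (· != '\n') cs.tail
         have h2 : cs.tail.length ≤ cs.length := by cases cs <;> simp
         simp only [List.length_cons]; omega)

def remove_singleline_comments_py_alt (code : String) : String :=
  String.ofList (pvScanB code.toList)

-- ===== PRECONDITION & SPEC =====
def Spec_remove_singleline_comments_py (code : String) (out : String) : Prop := out = remove_singleline_comments_py_alt code
instance (code : String) (out : String) : Decidable (Spec_remove_singleline_comments_py code out) := by unfold Spec_remove_singleline_comments_py; infer_instance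

-- ===== CLAIM (what is proved, stated in full; the proofs are below) =====
def Claim_equal_remove_singleline_comments_py : Prop := ∀ (code : String), Dom_remove_singleline_comments_py code → Spec_remove_singleline_comments_py code (remove_singleline_comments_py code)

-- ===== LEMMAS AND PROOFS =====

-- reference splitter: the segments of l between newlines
def pvSegs : List Char → List (List Char)
  | [] => [[]]
  | c :: r => if c = '\n' then [] :: pvSegs r else (pvSegs r).modifyHead (c :: ·)

lemma pvSegs_ne_nil (l : List Char) : pvSegs l ≠ [] := by
  induction l with
  | nil => simp [pvSegs]
  | cons c r ih =>
    simp only [pvSegs]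
    split
    · simp
    · cases h : pvSegs r with
      | nil => exact absurd h ih
      | cons a t => simp [List.modifyHead]

lemma pvSegs_no_nl (s : List Char) (hs : '\n' ∉ s) : pvSegs s = [s] := by
  induction s with
  | nil => rfl
  | cons c r ih =>
    simp only [List.mem_cons, not_or] at hs
    simp [pvSegs, Ne.symm hs.1, ih hs.2, List.modifyHead]

lemma pvSegs_append (s r : List Char) (hs : '\n' ∉ s) :
    pvSegs (s ++ '\n' :: r) = s :: pvSegs r := by
  induction s with
  | nil => simp [pvSegs]
  | cons c s' ih =>
    simp only [List.mem_cons, not_or] at hs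
    simp [pvSegs, Ne.symm hs.1, ih hs.2, List.modifyHead]

lemma go_nl (fuel : Nat) : ∀ (l cur : List Char) (acc : List (List Char)) (_ : l.length < fuel),
    PySem.Chars.splitOn.go ['\n'] fuel l cur acc
      = acc.reverse ++ (pvSegs l).modifyHead (cur.reverse ++ ·) := by
  induction fuel with
  | zero => intro l cur acc h; omega
  | succ fuel ih =>
    intro l cur acc h
    cases l with
    | nil => simp [PySem.Chars.splitOn.go, pvSegs, List.modifyHead]
    | cons c rest =>
      rw [PySem.Chars.splitOn.go]
      by_cases hc : c = '\n'
      · subst hc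
        have hpre : ['\n'].isPrefixOf ('\n' :: rest) = true := by simp [List.isPrefixOf]
        simp only [hpre, if_true, List.length_singleton, List.drop_one, List.tail_cons]
        rw [ih rest [] (cur.reverse :: acc) (by simp at h; omega)]
        obtain ⟨a, t, hat⟩ : ∃ a t, pvSegs rest = a :: t := by
          cases hs : pvSegs rest with
          | nil => exact absurd hs (pvSegs_ne_nil rest)
          | cons a t => exact ⟨a, t, rfl⟩
        simp [pvSegs, hat, List.modifyHead]
      · have hpre : ['\n'].isPrefixOf (c :: rest) = false := by
          simp [List.isPrefixOf, Ne.symm hc]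
        simp only [hpre]
        rw [ih rest (c :: cur) acc (by simp at h; omega)]
        obtain ⟨a, t, hat⟩ : ∃ a t, pvSegs rest = a :: t := by
          cases hs : pvSegs rest with
          | nil => exact absurd hs (pvSegs_ne_nil rest)
          | cons a t => exact ⟨a, t, rfl⟩
        simp [pvSegs, hc, hat, List.modifyHead]

lemma splitOn_nl (l : List Char) : PySem.Chars.splitOn l ['\n'] = pvSegs l := by
  rw [PySem.Chars.splitOn, go_nl (l.length + 1) l [] [] (by omega)]
  obtain ⟨a, t, hat⟩ : ∃ a t, pvSegs l = a :: t := by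
    cases hs : pvSegs l with
    | nil => exact absurd hs (pvSegs_ne_nil l)
    | cons a t => exact ⟨a, t, rfl⟩
  simp [hat, List.modifyHead]

lemma pvFindC_cases (line : List Char) (i : Nat) :
    pvFindC line i = -1 ∨ (i : Int) ≤ pvFindC line i := by
  fun_induction pvFindC line i with
  | case1 i h hs hb ih =>
    rcases ih with h1 | h1
    · exact Or.inl h1
    · exact Or.inr (by omega)
  | case2 i h hs hb => exact Or.inr le_rfl
  | case3 i h hs ih =>
    rcases ih with h1 | h1
    · exact Or.inl h1
    · exact Or.inr (by omega)
  | case4 i h => exact Or.inl rfl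

-- the per-line result of A, in drop/take form
def pvLineAList (s : List Char) : List Char :=
  if pvFindC s 0 ≠ -1 then s.take (pvFindC s 0).toNat else s

lemma pvLineA_eq (s : List Char) : pvLineA s = pvLineAList s := by
  unfold pvLineA pvLineAList
  by_cases h : pvFindC s 0 = -1
  · simp [h]
  · have h0 : (0 : Int) ≤ pvFindC s 0 := by
      rcases pvFindC_cases s 0 with h1 | h1
      · exact absurd h1 h
      · exact_mod_cast h1
    simp only [h, if_true, ne_eq, not_false_iff]
    rw [show pvFindC s 0 = (((pvFindC s 0).toNat : Nat) : Int) from (Int.toNat_of_nonneg h0).symm,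
      PySem.List.slice_to_natCast]
    simp
    omega

lemma pvSlice2 (l : List Char) (i : Nat) :
    PySem.List.slice l (some (i : Int)) (some ((i : Int) + 2)) = (l.drop i).take 2 := by
  have h2 := PySem.List.slice_natCast_add l i 2
  exact_mod_cast h2

lemma pvGetBr (l : List Char) (i : Nat) : PySem.List.pyGet? l ((i : Int) + 2) = l[i + 2]? := by
  exact_mod_cast PySem.List.pyGet?_natCast l (i + 2)

lemma scan_line (ln : List Char) (i : Nat) (tail : List Char)
    (hl : '\n' ∉ ln) (ht : tail = [] ∨ tail.head? = some '\n') :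
    pvScanB (ln.drop i ++ tail)
      = (if pvFindC ln i ≠ -1 then (ln.drop i).take ((pvFindC ln i).toNat - i)
         else ln.drop i) ++ pvScanB tail := by
  have hmem : ∀ x ∈ ln, x ≠ '\n' := fun x hx hxe => hl (hxe ▸ hx)
  have htailh : ∀ c, tail.head? = some c → c = '\n' := by
    intro c hc
    rcases ht with h1 | h1
    · simp [h1] at hc
    · rw [h1] at hc
      exact (Option.some_inj.1 hc).symm
  fun_induction pvFindC ln i with
  | case1 i h hs hb ih =>
    have hi1 : i + 1 < ln.length := by omega
    have hi2 : i + 2 < ln.length := by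
      have := hb.1
      omega
    have hd0 : ln.drop i = ln[i] :: ln.drop (i + 1) := List.drop_eq_getElem_cons (by omega)
    have hd1 : ln.drop (i + 1) = ln[i + 1] :: ln.drop (i + 2) := List.drop_eq_getElem_cons (by omega)
    have hd2 : ln.drop (i + 2) = ln[i + 2] :: ln.drop (i + 3) := List.drop_eq_getElem_cons (by omega)
    have hsl : (ln.drop i).take 2 = ['-', '-'] := by rw [← pvSlice2]; exact hs
    rw [hd0, hd1] at hsl
    have hsl2 : ([ln[i], ln[i + 1]] : List Char) = ['-', '-'] := hsl
    simp at hsl2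
    obtain ⟨la, lb⟩ := hsl2
    have hbr : ln[i + 2] = '[' := by
      have h2 := hb.2
      rw [pvGetBr, List.getElem?_eq_getElem hi2] at h2
      exact Option.some_inj.1 h2
    have key : pvScanB (ln.drop i ++ tail) = '-' :: pvScanB (ln.drop (i + 1) ++ tail) := by
      simp only [hd0, hd1, hd2, la, lb, hbr, List.cons_append]
      rw [pvScanB]
      simp
    rw [key, ih]
    rcases pvFindC_cases ln (i + 1) with hF | hF
    · simp [hF, hd0, la]
    · have hne : pvFindC ln (i + 1) ≠ -1 := by omega
      rw [if_pos hne, if_pos hne, hd0, la,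
        (show (pvFindC ln (i + 1)).toNat - i = ((pvFindC ln (i + 1)).toNat - (i + 1)) + 1 by omega),
        List.take_succ_cons, List.cons_append]
  | case2 i h hs hb =>
    have hi1 : i + 1 < ln.length := by omega
    have hd0 : ln.drop i = ln[i] :: ln.drop (i + 1) := List.drop_eq_getElem_cons (by omega)
    have hd1 : ln.drop (i + 1) = ln[i + 1] :: ln.drop (i + 2) := List.drop_eq_getElem_cons (by omega)
    have hsl : (ln.drop i).take 2 = ['-', '-'] := by rw [← pvSlice2]; exact hs
    rw [hd0, hd1] at hsl
    have hsl2 : ([ln[i], ln[i + 1]] : List Char) = ['-', '-'] := hsl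
    simp at hsl2
    obtain ⟨la, lb⟩ := hsl2
    have hbrf : (ln.drop (i + 2) ++ tail).head? ≠ some '[' := by
      by_cases h2 : i + 2 < ln.length
      · have hd2 : ln.drop (i + 2) = ln[i + 2] :: ln.drop (i + 3) := List.drop_eq_getElem_cons (by omega)
        rw [hd2]
        simp only [List.cons_append, List.head?_cons, ne_eq, Option.some_inj]
        intro hEq
        apply hb
        constructor
        · omega
        · rw [pvGetBr, List.getElem?_eq_getElem h2, hEq]
      · have hd2 : ln.drop (i + 2) = [] := List.drop_eq_nil_of_le (by omega)
        rw [hd2, List.nil_append]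
        intro hEq
        have := htailh '[' hEq
        simp at this
    have hdw : List.dropWhile (· != '\n') (ln.drop (i + 2) ++ tail) = tail := by
      rw [List.dropWhile_append]
      have h1 : List.dropWhile (· != '\n') (ln.drop (i + 2)) = [] := by
        rw [List.dropWhile_eq_nil_iff]
        intro x hx
        simp [hmem x (List.drop_subset _ _ hx)]
      have h2 : List.dropWhile (· != '\n') tail = tail := by
        rcases ht with h3 | h3
        · rw [h3]
          rfl
        · cases tail with
          | nil => rfl
          | cons c r =>
            simp only [List.head?_cons, Option.some_inj] at h3
            rw [h3]
            simp
      simp [h1, h2]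
    have key : pvScanB (ln.drop i ++ tail) = pvScanB tail := by
      rw [hd0, la, hd1, lb]
      simp only [List.cons_append]
      rw [pvScanB]
      rw [if_pos (by simp), if_neg (by simpa using hbrf)]
      simp only [List.tail_cons]
      rw [hdw]
    rw [key, if_pos (by omega : ((i : Nat) : Int) ≠ -1)]
    simp
  | case3 i h hs ih =>
    have hi1 : i + 1 < ln.length := by omega
    have hd0 : ln.drop i = ln[i] :: ln.drop (i + 1) := List.drop_eq_getElem_cons (by omega)
    have hd1 : ln.drop (i + 1) = ln[i + 1] :: ln.drop (i + 2) := List.drop_eq_getElem_cons (by omega)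
    have hsl : ¬ (ln[i] = '-' ∧ ln[i + 1] = '-') := by
      intro ⟨la, lb⟩
      apply hs
      rw [pvSlice2, hd0, hd1, la, lb]
      rfl
    have key : pvScanB (ln.drop i ++ tail) = ln[i] :: pvScanB (ln.drop (i + 1) ++ tail) := by
      rw [hd0]
      simp only [List.cons_append]
      rw [pvScanB]
      rw [if_neg]
      intro ⟨ha, hh⟩
      apply hsl
      refine ⟨ha, ?_⟩
      rw [hd1, List.cons_append, List.head?_cons] at hh
      exact Option.some_inj.1 hh
    rw [key, ih]
    rcases pvFindC_cases ln (i + 1) with hF | hF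
    · rw [hF, if_neg (by simp), if_neg (by simp), hd0, List.cons_append]
    · have hne : pvFindC ln (i + 1) ≠ -1 := by omega
      rw [if_pos hne, if_pos hne, hd0,
        (show (pvFindC ln (i + 1)).toNat - i = ((pvFindC ln (i + 1)).toNat - (i + 1)) + 1 by omega),
        List.take_succ_cons, List.cons_append]
  | case4 i h =>
    rw [if_neg (by simp)]
    by_cases hi : i < ln.length
    · have hd0 : ln.drop i = ln[i] :: ln.drop (i + 1) := List.drop_eq_getElem_cons hi
      have hd1 : ln.drop (i + 1) = [] := List.drop_eq_nil_of_le (by omega)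
      rw [hd0, hd1]
      simp only [List.cons_append, List.nil_append]
      rw [pvScanB]
      rw [if_neg]
      intro ⟨_, hh⟩
      have := htailh '-' hh
      simp at this
    · have hd0 : ln.drop i = [] := List.drop_eq_nil_of_le (by omega)
      rw [hd0]
      simp

lemma pvScanB_main (l : List Char) :
    pvScanB l = List.intercalate ['\n'] ((pvSegs l).map pvLineAList) := by
  generalize hn : l.length = n
  induction n using Nat.strong_induction_on generalizing l with
  | _ n ih =>
    have hst := List.takeWhile_append_dropWhile (p := (· != '\n')) (l := l)
    have hs : '\n' ∉ l.takeWhile (· != '\n') := by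
      intro hm
      have := List.mem_takeWhile_imp hm
      simp at this
    cases ht : l.dropWhile (· != '\n') with
    | nil =>
      have hs' : '\n' ∉ l := by
        rw [← hst, ht, List.append_nil]
        exact hs
      rw [pvSegs_no_nl l hs']
      have hsc := scan_line l 0 [] hs' (Or.inl rfl)
      simp only [List.drop_zero, List.append_nil, Nat.sub_zero] at hsc
      rw [hsc]
      simp [List.intercalate, pvLineAList, pvScanB]
    | cons c r =>
      have hc : c = '\n' := by
        have := List.head_dropWhile_not (· != '\n') (l := l) (by rw [ht]; simp)
        simp [ht] at this
        exact this
      subst hc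
      obtain ⟨t, hsnl, hl⟩ : ∃ t, '\n' ∉ t ∧ l = t ++ '\n' :: r :=
        ⟨_, hs, by conv_lhs => rw [← hst, ht]⟩
      subst hl
      rw [pvSegs_append t r hsnl]
      have hsc := scan_line t 0 ('\n' :: r) hsnl (Or.inr rfl)
      simp only [List.drop_zero, Nat.sub_zero] at hsc
      rw [hsc]
      have hscan_nl : pvScanB ('\n' :: r) = '\n' :: pvScanB r := by
        rw [pvScanB]
        simp
      have hr : pvScanB r = List.intercalate ['\n'] ((pvSegs r).map pvLineAList) := by
        apply ih r.length _ r rfl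
        simp at hn
        omega
      obtain ⟨a, t', hat⟩ : ∃ a t', pvSegs r = a :: t' := by
        cases hsg : pvSegs r with
        | nil => exact absurd hsg (pvSegs_ne_nil r)
        | cons a t' => exact ⟨a, t', rfl⟩
      rw [hscan_nl, hr, hat]
      simp only [List.map_cons, List.intercalate]
      simp [pvLineAList]

-- ===== VERDICT (by name: the statement is the Claim_ definition above) =====
theorem remove_singleline_comments_py_spec : Claim_equal_remove_singleline_comments_py := by
  intro code _
  unfold Spec_remove_singleline_comments_py remove_singleline_comments_py remove_singleline_comments_py_alt
  rw [splitOn_nl, PySem.Chars.join, pvScanB_main]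
  rw [List.map_congr_left (fun s _ => pvLineA_eq s)]
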